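-- pv_equiv track=rewrite | github.com/pypi-data/pypi-mirror-399 | packages/moai-adk/moai_adk-0.36.0.tar.gz/moai_adk-0.36.0/src/moai_adk/core/spec/ears_template_engine.py | _analyze_architecture
-- ===== SOURCE A (Python) =====
-- from typing import Any, Dict
--
-- def _analyze_architecture(extraction: Dict[str, Any]) -> str:
--     """Analyze system architecture."""
--     imports = extraction["imports"]
--
--     # Check for architectural patterns
--     if any("django" in imp.lower() for imp in imports):
--         return "mvc"
--     elif any("react" in imp.lower() or "vue" in imp.lower() for imp in imports):
--         return "frontend"
--     elif any("fastapi" in imp.lower() or "flask" in imp.lower() for imp in imports):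
--         return "api"
--     elif any("sqlalchemy" in imp.lower() or "django" in imp.lower() for imp in imports):
--         return "data"
--     else:
--         return "simple"
-- ===== SOURCE B (Python) =====
-- def _analyze_architecture(extraction):
--     """Analyze system architecture."""
--     imports = extraction["imports"]
--     mvc = frontend = api = data = False
--     for imp in imports:
--         low = imp.lower()
--         mvc = mvc or "django" in low
--         frontend = frontend or "react" in low or "vue" in low
--         api = api or "fastapi" in low or "flask" in low
--         data = data or "sqlalchemy" in low
--     if mvc:
--         return "mvc"
--     if frontend:
--         return "frontend"
--     if api:
--         return "api"
--     if data:
--         return "data"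
--     return "simple"
-- ===== Notes on version B (the rewrite author's own statement) =====
-- stated objective: alternative
-- what changed: Replaces A's four separate any()-scans over imports with a single pass that lowercases each import once and accumulates four boolean pattern flags, then resolves the priority chain (the redundant django check in A's data branch disappears since the mvc flag already covers it).
import Mathlib
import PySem

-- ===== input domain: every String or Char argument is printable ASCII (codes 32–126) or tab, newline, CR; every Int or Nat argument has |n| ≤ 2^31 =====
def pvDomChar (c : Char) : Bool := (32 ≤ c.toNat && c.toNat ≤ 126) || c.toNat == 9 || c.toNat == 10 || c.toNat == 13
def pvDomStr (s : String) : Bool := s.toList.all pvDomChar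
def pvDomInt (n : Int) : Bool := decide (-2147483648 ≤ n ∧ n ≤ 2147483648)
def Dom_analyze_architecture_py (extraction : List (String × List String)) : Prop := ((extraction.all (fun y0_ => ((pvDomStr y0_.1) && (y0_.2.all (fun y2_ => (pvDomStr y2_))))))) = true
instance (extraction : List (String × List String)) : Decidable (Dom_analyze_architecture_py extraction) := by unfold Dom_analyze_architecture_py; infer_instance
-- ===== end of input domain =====

-- B replaces A's four repeated any()-scans with one pass accumulating boolean pattern flags, then a separate priority resolution (alternative decomposition, same cost class).


-- ===== PORT A =====
def analyze_architecture_py (extraction : List (String × List String)) : String :=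
  match (PySem.Dict.mk extraction).get? "imports" with
  | none => ""  -- KeyError in Python; excluded by Pre_
  | some imports =>
    if imports.any (fun imp => PySem.Str.isIn "django" (PySem.Str.lower imp)) then "mvc"
    else if imports.any (fun imp => PySem.Str.isIn "react" (PySem.Str.lower imp) || PySem.Str.isIn "vue" (PySem.Str.lower imp)) then "frontend"
    else if imports.any (fun imp => PySem.Str.isIn "fastapi" (PySem.Str.lower imp) || PySem.Str.isIn "flask" (PySem.Str.lower imp)) then "api"
    else if imports.any (fun imp => PySem.Str.isIn "sqlalchemy" (PySem.Str.lower imp) || PySem.Str.isIn "django" (PySem.Str.lower imp)) then "data"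
    else "simple"

-- ===== PORT B =====
def analyze_architecture_py_alt (extraction : List (String × List String)) : String :=
  match (PySem.Dict.mk extraction).get? "imports" with
  | none => ""  -- KeyError in Python; excluded by Pre_
  | some imports =>
    let fl : Bool × Bool × Bool × Bool := imports.foldl
      (fun (fl : Bool × Bool × Bool × Bool) imp =>
        let low := PySem.Str.lower imp
        (fl.1 || PySem.Str.isIn "django" low,
         fl.2.1 || PySem.Str.isIn "react" low || PySem.Str.isIn "vue" low,
         fl.2.2.1 || PySem.Str.isIn "fastapi" low || PySem.Str.isIn "flask" low,
         fl.2.2.2 || PySem.Str.isIn "sqlalchemy" low))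
      (false, false, false, false)
    if fl.1 then "mvc"
    else if fl.2.1 then "frontend"
    else if fl.2.2.1 then "api"
    else if fl.2.2.2 then "data"
    else "simple"

-- ===== PRECONDITION & SPEC =====
-- Pre_ excludes only inputs where Python A raises KeyError: no "imports" key in the dict.
def Pre_analyze_architecture_py (extraction : List (String × List String)) : Prop :=
  ∃ p ∈ extraction, p.1 = "imports"
instance (extraction : List (String × List String)) : Decidable (Pre_analyze_architecture_py extraction) := by unfold Pre_analyze_architecture_py; infer_instance

def pvWitness_analyze_architecture_py : (List (String × List String)) := [("imports", ["django", "os"])]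

def Spec_analyze_architecture_py (extraction : List (String × List String)) (out : String) : Prop := out = analyze_architecture_py_alt extraction
instance (extraction : List (String × List String)) (out : String) : Decidable (Spec_analyze_architecture_py extraction out) := by unfold Spec_analyze_architecture_py; infer_instance

-- ===== CLAIM (what is proved, stated in full; the proofs are below) =====
def Claim_equal_analyze_architecture_py : Prop := ∀ (extraction : List (String × List String)), Dom_analyze_architecture_py extraction → Pre_analyze_architecture_py extraction → Spec_analyze_architecture_py extraction (analyze_architecture_py extraction)

-- ===== LEMMAS AND PROOFS =====

-- The single-pass flag fold computes the four any-scans.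
theorem flags_eq (imports : List String) :
    imports.foldl
      (fun (fl : Bool × Bool × Bool × Bool) imp =>
        let low := PySem.Str.lower imp
        (fl.1 || PySem.Str.isIn "django" low,
         fl.2.1 || PySem.Str.isIn "react" low || PySem.Str.isIn "vue" low,
         fl.2.2.1 || PySem.Str.isIn "fastapi" low || PySem.Str.isIn "flask" low,
         fl.2.2.2 || PySem.Str.isIn "sqlalchemy" low))
      (false, false, false, false)
    = (imports.any (fun imp => PySem.Str.isIn "django" (PySem.Str.lower imp)),
       imports.any (fun imp => PySem.Str.isIn "react" (PySem.Str.lower imp) || PySem.Str.isIn "vue" (PySem.Str.lower imp)),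
       imports.any (fun imp => PySem.Str.isIn "fastapi" (PySem.Str.lower imp) || PySem.Str.isIn "flask" (PySem.Str.lower imp)),
       imports.any (fun imp => PySem.Str.isIn "sqlalchemy" (PySem.Str.lower imp))) := by
  have gen : ∀ (l : List String) (a b c d : Bool),
      l.foldl
        (fun (fl : Bool × Bool × Bool × Bool) imp =>
          let low := PySem.Str.lower imp
          (fl.1 || PySem.Str.isIn "django" low,
           fl.2.1 || PySem.Str.isIn "react" low || PySem.Str.isIn "vue" low,
           fl.2.2.1 || PySem.Str.isIn "fastapi" low || PySem.Str.isIn "flask" low,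
           fl.2.2.2 || PySem.Str.isIn "sqlalchemy" low))
        (a, b, c, d)
      = (a || l.any (fun imp => PySem.Str.isIn "django" (PySem.Str.lower imp)),
         b || l.any (fun imp => PySem.Str.isIn "react" (PySem.Str.lower imp) || PySem.Str.isIn "vue" (PySem.Str.lower imp)),
         c || l.any (fun imp => PySem.Str.isIn "fastapi" (PySem.Str.lower imp) || PySem.Str.isIn "flask" (PySem.Str.lower imp)),
         d || l.any (fun imp => PySem.Str.isIn "sqlalchemy" (PySem.Str.lower imp))) := by
    intro l
    induction l with
    | nil => simp
    | cons h t ih =>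
      intro a b c d
      simp only [List.foldl_cons, List.any_cons, ih]
      simp [Bool.or_assoc]
  simpa using gen imports false false false false

-- If no import contains "django", A's fourth scan reduces to the sqlalchemy-only scan.
theorem data_scan_eq (imports : List String)
    (h : imports.any (fun imp => PySem.Str.isIn "django" (PySem.Str.lower imp)) = false) :
    imports.any (fun imp => PySem.Str.isIn "sqlalchemy" (PySem.Str.lower imp) || PySem.Str.isIn "django" (PySem.Str.lower imp))
    = imports.any (fun imp => PySem.Str.isIn "sqlalchemy" (PySem.Str.lower imp)) := by
  simp only [List.any_eq_false] at h
  simp only [List.any_eq, Bool.or_eq_true]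
  rw [decide_eq_decide]
  constructor <;> intro ⟨x, hx, hp⟩
  · exact ⟨x, hx, hp.resolve_right (by simpa using h x hx)⟩
  · exact ⟨x, hx, Or.inl hp⟩

-- ===== VERDICT (by name: the statement is the Claim_ definition above) =====
theorem analyze_architecture_py_spec : Claim_equal_analyze_architecture_py := by
  intro extraction _ _
  unfold Spec_analyze_architecture_py analyze_architecture_py analyze_architecture_py_alt
  cases hg : (PySem.Dict.mk extraction).get? "imports" with
  | none => rfl
  | some imports =>
    dsimp only
    rw [flags_eq]
    by_cases h1 : imports.any (fun imp => PySem.Str.isIn "django" (PySem.Str.lower imp)) = true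
    · rw [if_pos h1, if_pos h1]
    · have h1' : imports.any (fun imp => PySem.Str.isIn "django" (PySem.Str.lower imp)) = false :=
        Bool.eq_false_iff.mpr h1
      rw [if_neg h1, if_neg h1, data_scan_eq imports h1']
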